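-- pv_equiv track=rewrite | github.com/asmundur/gloggur | src/gloggur/indexer/indexer.py | _merged_line_count
-- ===== SOURCE A (Python) =====
-- def _merged_line_count(ranges_by_path: dict[str, list[tuple[int, int]]]) -> int:
--     """Return total unique line coverage after merging ranges per file path."""
--     total = 0
--     for ranges in ranges_by_path.values():
--         if not ranges:
--             continue
--         sorted_ranges = sorted(ranges)
--         current_start, current_end = sorted_ranges[0]
--         for start_line, end_line in sorted_ranges[1:]:
--             if start_line <= current_end + 1:
--                 current_end = max(current_end, end_line)
--                 continue
--             total += current_end - current_start + 1
--             current_start, current_end = start_line, end_line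
--         total += current_end - current_start + 1
--     return total
-- ===== SOURCE B (Python) =====
-- def _merged_line_count(ranges_by_path: dict[str, list[tuple[int, int]]]) -> int:
--     """Two staged passes per path: group the sorted ranges into explicit
--     chain-connected cluster lists, then sum each cluster's span."""
--     total = 0
--     for ranges in ranges_by_path.values():
--         clusters = []
--         for start_line, end_line in sorted(ranges):
--             if clusters and start_line <= max(e for _, e in clusters[-1]) + 1:
--                 clusters[-1].append((start_line, end_line))
--             else:
--                 clusters.append([(start_line, end_line)])
--         for cluster in clusters:
--             total += max(e for _, e in cluster) - cluster[0][0] + 1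
--     return total
-- ===== Notes on version B (the rewrite author's own statement) =====
-- stated objective: alternative
-- what changed: Replaces A's single merge sweep with mutable current_start/current_end accumulators by two staged passes over a new data structure: first group the sorted ranges into explicit chain-connected cluster lists, then sum each cluster's span as max(ends) - first start + 1.
import Mathlib
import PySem

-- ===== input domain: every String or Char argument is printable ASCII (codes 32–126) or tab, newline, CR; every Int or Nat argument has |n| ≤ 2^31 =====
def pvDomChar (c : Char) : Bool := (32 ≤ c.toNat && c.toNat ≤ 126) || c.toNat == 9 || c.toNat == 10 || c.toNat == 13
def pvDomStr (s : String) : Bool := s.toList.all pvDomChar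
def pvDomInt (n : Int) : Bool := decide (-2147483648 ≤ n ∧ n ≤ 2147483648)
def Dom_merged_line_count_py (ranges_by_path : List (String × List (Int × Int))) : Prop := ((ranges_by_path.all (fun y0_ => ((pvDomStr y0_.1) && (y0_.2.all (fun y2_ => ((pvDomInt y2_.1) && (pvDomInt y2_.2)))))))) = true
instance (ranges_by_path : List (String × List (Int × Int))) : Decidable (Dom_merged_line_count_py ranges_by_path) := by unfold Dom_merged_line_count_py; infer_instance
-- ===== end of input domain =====

-- B replaces A's one-pass merge sweep (current_start/current_end accumulators, flush at gaps
-- and after the loop) by two staged passes: build explicit cluster lists, then sum spans; exact equivalence.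


-- ===== PORT A =====
-- inner loop of A: state (total, current_start, current_end)
def pvAStep (s : Int × Int × Int) (p : Int × Int) : Int × Int × Int :=
  if p.1 ≤ s.2.2 + 1 then (s.1, s.2.1, max s.2.2 p.2)
  else (s.1 + s.2.2 - s.2.1 + 1, p.1, p.2)

def merged_line_count_py (ranges_by_path : List (String × List (Int × Int))) : Int :=
  (PySem.Dict.ofList ranges_by_path).values.foldl
    (fun total ranges =>
      if ranges.isEmpty then total
      else
        match PySem.List.sorted2 ranges Prod.fst Prod.snd with
        | [] => total  -- unreachable: sorted of a non-empty list is non-empty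
        | hd :: rest =>
          let st := rest.foldl pvAStep (total, hd.1, hd.2)
          st.1 + st.2.2 - st.2.1 + 1) 0

-- ===== PORT B =====
-- max(e for _, e in cluster): max of the second components of a non-empty list
def pvMaxEnd (c : List (Int × Int)) : Int :=
  match c with
  | [] => 0  -- unreachable: clusters are never empty
  | h :: t => t.foldl (fun m p => max m p.2) h.2

-- cluster[0][0]: first start of a non-empty cluster
def pvHeadStart (c : List (Int × Int)) : Int :=
  match c with
  | [] => 0  -- unreachable
  | h :: _ => h.1

-- first pass of B: append the next range to the last cluster or open a new one
def pvAddToClusters (cs : List (List (Int × Int))) (p : Int × Int) : List (List (Int × Int)) :=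
  match cs.getLast? with
  | some last => if p.1 ≤ pvMaxEnd last + 1 then cs.dropLast ++ [last ++ [p]] else cs ++ [[p]]
  | none => [[p]]

def merged_line_count_py_alt (ranges_by_path : List (String × List (Int × Int))) : Int :=
  (PySem.Dict.ofList ranges_by_path).values.foldl
    (fun total ranges =>
      ((PySem.List.sorted2 ranges Prod.fst Prod.snd).foldl pvAddToClusters []).foldl
        (fun t c => t + pvMaxEnd c - pvHeadStart c + 1) total) 0

-- ===== PRECONDITION & SPEC =====
def Spec_merged_line_count_py (ranges_by_path : List (String × List (Int × Int))) (out : Int) : Prop := out = merged_line_count_py_alt ranges_by_path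
instance (ranges_by_path : List (String × List (Int × Int))) (out : Int) : Decidable (Spec_merged_line_count_py ranges_by_path out) := by unfold Spec_merged_line_count_py; infer_instance

-- ===== CLAIM (what is proved, stated in full; the proofs are below) =====
def Claim_equal_merged_line_count_py : Prop := ∀ (ranges_by_path : List (String × List (Int × Int))), Dom_merged_line_count_py ranges_by_path → Spec_merged_line_count_py ranges_by_path (merged_line_count_py ranges_by_path)

-- ===== LEMMAS AND PROOFS =====

theorem pv_maxEnd_append (l : List (Int × Int)) (p : Int × Int) (h : l ≠ []) :
    pvMaxEnd (l ++ [p]) = max (pvMaxEnd l) p.2 := by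
  rcases l with _ | ⟨hd, t⟩
  · exact absurd rfl h
  · simp [pvMaxEnd, List.foldl_append]

theorem pv_headStart_append (l : List (Int × Int)) (p : Int × Int) (h : l ≠ []) :
    pvHeadStart (l ++ [p]) = pvHeadStart l := by
  rcases l with _ | ⟨hd, t⟩
  · exact absurd rfl h
  · simp [pvHeadStart]

theorem pv_add_last (init : List (List (Int × Int))) (l : List (Int × Int)) (p : Int × Int) :
    pvAddToClusters (init ++ [l]) p =
      if p.1 ≤ pvMaxEnd l + 1 then init ++ [l ++ [p]] else (init ++ [l]) ++ [[p]] := by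
  simp [pvAddToClusters]

-- shift the accumulator out of B's summing pass
theorem pv_sum_shift (L : List (List (Int × Int))) : ∀ (t0 : Int),
    L.foldl (fun t c => t + pvMaxEnd c - pvHeadStart c + 1) t0
      = t0 + L.foldl (fun t c => t + pvMaxEnd c - pvHeadStart c + 1) 0 := by
  induction L with
  | nil => intro t0; simp
  | cons c L ih =>
    intro t0
    simp only [List.foldl_cons]
    rw [ih (t0 + pvMaxEnd c - pvHeadStart c + 1), ih (0 + pvMaxEnd c - pvHeadStart c + 1)]
    ring

-- Invariant: A's state over the rest equals B's cluster list over the rest.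
theorem pv_loop_eq (rest : List (Int × Int)) :
    ∀ (tA : Int) (init : List (List (Int × Int))) (l : List (Int × Int)), l ≠ [] →
    (rest.foldl pvAddToClusters (init ++ [l])).foldl
        (fun t c => t + pvMaxEnd c - pvHeadStart c + 1) 0
      = (init.foldl (fun t c => t + pvMaxEnd c - pvHeadStart c + 1) 0)
        + ((rest.foldl pvAStep (tA, pvHeadStart l, pvMaxEnd l)).1 - tA)
        + ((rest.foldl pvAStep (tA, pvHeadStart l, pvMaxEnd l)).2.2
           - (rest.foldl pvAStep (tA, pvHeadStart l, pvMaxEnd l)).2.1 + 1) := by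
  induction rest with
  | nil =>
    intro tA init l hl
    simp only [List.foldl_nil, List.foldl_append, List.foldl_cons]
    ring
  | cons p rest ih =>
    intro tA init l hl
    simp only [List.foldl_cons, pv_add_last, pvAStep]
    by_cases h1 : p.1 ≤ pvMaxEnd l + 1
    · rw [if_pos h1, if_pos h1]
      have hne : l ++ [p] ≠ [] := by simp
      have := ih tA init (l ++ [p]) hne
      rw [pv_maxEnd_append l p hl, pv_headStart_append l p hl] at this
      exact this
    · rw [if_neg h1, if_neg h1]
      have := ih (tA + pvMaxEnd l - pvHeadStart l + 1) (init ++ [l]) [p] (by simp)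
      rw [show pvHeadStart [p] = p.1 from rfl, show pvMaxEnd [p] = p.2 from rfl] at this
      rw [this, List.foldl_append]
      simp only [List.foldl_cons, List.foldl_nil]
      ring

-- Per-path bodies of the two outer folds agree.
theorem pv_path_eq (total : Int) (ranges : List (Int × Int)) :
    (if ranges.isEmpty then total
     else
       match PySem.List.sorted2 ranges Prod.fst Prod.snd with
       | [] => total
       | hd :: rest =>
         let st := rest.foldl pvAStep (total, hd.1, hd.2)
         st.1 + st.2.2 - st.2.1 + 1)
      = ((PySem.List.sorted2 ranges Prod.fst Prod.snd).foldl pvAddToClusters []).foldl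
          (fun t c => t + pvMaxEnd c - pvHeadStart c + 1) total := by
  by_cases he : ranges.isEmpty
  · have : ranges = [] := List.isEmpty_iff.mp he
    subst this; simp [PySem.List.sorted2]
  · rw [if_neg he]
    have hperm := PySem.List.sorted2_perm ranges Prod.fst Prod.snd false
    rcases hs : PySem.List.sorted2 ranges Prod.fst Prod.snd with _ | ⟨hd, rest⟩
    · rw [hs] at hperm
      exact absurd (List.isEmpty_iff.mpr hperm.symm.eq_nil) he
    · simp only [List.foldl_cons]
      have h0 : pvAddToClusters [] hd = ([] : List (List (Int × Int))) ++ [[hd]] := by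
        simp [pvAddToClusters]
      rw [h0, pv_sum_shift]
      have := pv_loop_eq rest total [] [hd] (by simp)
      rw [show pvHeadStart [hd] = hd.1 from rfl, show pvMaxEnd [hd] = hd.2 from rfl,
          List.nil_append] at this
      simp only [List.nil_append]
      rw [this]
      simp only [List.foldl_nil]
      ring

-- ===== VERDICT (by name: the statement is the Claim_ definition above) =====
theorem merged_line_count_py_spec : Claim_equal_merged_line_count_py := by
  intro ranges_by_path _
  unfold Spec_merged_line_count_py merged_line_count_py merged_line_count_py_alt
  congr 1
  funext total ranges
  exact pv_path_eq total ranges
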